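-- pv_equiv track=rewrite | github.com/Abhay-2811/UniFL | federated-learning/client.py | validate_near_address
-- ===== SOURCE A (Python) =====
-- def validate_near_address(address: str) -> bool:
--     """Validate NEAR account ID format"""
--     # NEAR account IDs must be at least 2 characters
--     if len(address) < 2:
--         return False
--
--     # Must contain only lowercase letters, digits, or the following characters: - _ .
--     valid_chars = set('abcdefghijklmnopqrstuvwxyz0123456789-_.')
--     if not all(c in valid_chars for c in address):
--         return False
--
--     # Cannot start or end with special characters
--     if address[0] in '-_.' or address[-1] in '-_.':
--         return False
--
--     return True
-- ===== SOURCE B (Python) =====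
-- def validate_near_address(address: str) -> bool:
--     """Validate NEAR account ID format (single pass, no set/extra scans)."""
--     n = len(address)
--     if n < 2:
--         return False
--     for i, c in enumerate(address):
--         if 'a' <= c <= 'z' or '0' <= c <= '9':
--             continue
--         # only '-', '_', '.' are otherwise allowed, and never at either end
--         if i == 0 or i == n - 1 or c not in '-_.':
--             return False
--     return True
-- ===== Notes on version B (the rewrite author's own statement) =====
-- stated objective: alternative
-- what changed: A builds a 39-character set, runs a full all()-membership scan, and then separately tests the first and last characters; B makes one position-aware pass with enumerate, classifying each character by range comparisons and allowing the three special punctuation characters only at interior positions.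
import Mathlib
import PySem

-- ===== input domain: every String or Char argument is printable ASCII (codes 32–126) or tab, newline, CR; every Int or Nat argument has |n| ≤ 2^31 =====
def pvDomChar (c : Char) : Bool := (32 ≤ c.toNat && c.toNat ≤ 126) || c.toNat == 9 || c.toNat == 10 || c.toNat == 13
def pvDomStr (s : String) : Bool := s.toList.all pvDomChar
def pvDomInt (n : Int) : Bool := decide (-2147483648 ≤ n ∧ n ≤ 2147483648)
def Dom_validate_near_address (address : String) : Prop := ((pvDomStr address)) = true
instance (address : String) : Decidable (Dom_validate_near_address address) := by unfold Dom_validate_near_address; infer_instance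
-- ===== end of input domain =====

-- B replaces A's three separate passes (build a set, all()-scan, then endpoint tests) by a single
-- position-aware scan over enumerate(address); objective: alternative single-pass decomposition, same asymptotic cost.


-- ===== PORT A =====
-- set('abcdefghijklmnopqrstuvwxyz0123456789-_.') — the Python string literal written as its chars
def validate_near_address (address : String) : Bool :=
  let l := address.toList
  if l.length < 2 then false
  else
    let valid_chars : PySem.Set Char := PySem.Set.ofList
      ['a','b','c','d','e','f','g','h','i','j','k','l','m','n','o','p','q','r','s',
       't','u','v','w','x','y','z','0','1','2','3','4','5','6','7','8','9','-','_','.']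
    if !(l.all fun c => PySem.Set.contains valid_chars c) then false
    else if (['-','_','.'].contains (PySem.List.pyGetD l 0 ' '))
         || (['-','_','.'].contains (PySem.List.pyGetD l (-1) ' ')) then false
    else true

-- ===== PORT B =====
def validate_near_address_alt (address : String) : Bool :=
  let l := address.toList
  let n : Int := l.length
  if n < 2 then false
  else
    (PySem.List.enumerate l 0).all fun ic =>
      if ('a' ≤ ic.2 && ic.2 ≤ 'z') || ('0' ≤ ic.2 && ic.2 ≤ '9') then true
      else if ic.1 == 0 || ic.1 == n - 1 || !(['-','_','.'].contains ic.2) then false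
      else true

-- ===== PRECONDITION & SPEC =====
def Spec_validate_near_address (address : String) (out : Bool) : Prop := out = validate_near_address_alt address
instance (address : String) (out : Bool) : Decidable (Spec_validate_near_address address out) := by unfold Spec_validate_near_address; infer_instance

-- ===== CLAIM (what is proved, stated in full; the proofs are below) =====
def Claim_equal_validate_near_address : Prop := ∀ (address : String), Dom_validate_near_address address → Spec_validate_near_address address (validate_near_address address)

-- ===== LEMMAS AND PROOFS =====

-- A's character set, as membership: a char is valid iff it is lowercase, a digit, or one of - _ .
theorem pv_valid_char_iff (c : Char) :
    PySem.Set.contains (PySem.Set.ofList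
      ['a','b','c','d','e','f','g','h','i','j','k','l','m','n','o','p','q','r','s',
       't','u','v','w','x','y','z','0','1','2','3','4','5','6','7','8','9','-','_','.']) c = true
    ↔ (('a' ≤ c ∧ c ≤ 'z') ∨ ('0' ≤ c ∧ c ≤ '9') ∨ c ∈ ['-','_','.']) := by
  simp only [PySem.Set.contains, List.contains_iff_mem, PySem.Set.mem_ofList, List.mem_cons,
    List.not_mem_nil, or_false, Char.ext_iff, UInt32.ext_iff,
    Char.le_def, UInt32.le_iff_toNat_le, Char.reduceVal, UInt32.reduceToNat]
  omega

theorem pv_valid_char_iff' (c : Char) :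
    ((PySem.Set.ofList
      ['a','b','c','d','e','f','g','h','i','j','k','l','m','n','o','p','q','r','s',
       't','u','v','w','x','y','z','0','1','2','3','4','5','6','7','8','9','-','_','.']).contains c)
    = (decide (('a' ≤ c ∧ c ≤ 'z') ∨ ('0' ≤ c ∧ c ≤ '9') ∨ c ∈ (['-','_','.'] : List Char))) := by
  rw [Bool.eq_iff_iff, decide_eq_true_eq, ← pv_valid_char_iff]

theorem pv_main (l : List Char) (h2 : 2 ≤ l.length) :
    (if !(l.all fun c => PySem.Set.contains (PySem.Set.ofList
        ['a','b','c','d','e','f','g','h','i','j','k','l','m','n','o','p','q','r','s',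
         't','u','v','w','x','y','z','0','1','2','3','4','5','6','7','8','9','-','_','.']) c) then false
     else if (['-','_','.'].contains (PySem.List.pyGetD l 0 ' '))
          || (['-','_','.'].contains (PySem.List.pyGetD l (-1) ' ')) then false
     else true)
    = (PySem.List.enumerate l 0).all fun ic =>
        if ('a' ≤ ic.2 && ic.2 ≤ 'z') || ('0' ≤ ic.2 && ic.2 ≤ '9') then true
        else if ic.1 == 0 || ic.1 == ((l.length : Int)) - 1 || !(['-','_','.'].contains ic.2) then false
        else true := by
  have h0 : PySem.List.pyGetD l 0 ' ' = l[0]'(by omega) := by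
    cases l with
    | nil => simp at h2
    | cons a t => simp [PySem.List.pyGetD_zero_cons]
  have hlast : PySem.List.pyGetD l (-1) ' ' = l[l.length - 1]'(by omega) := by
    rw [PySem.List.pyGetD_neg_ofNat l 1 ' ' (by omega) (by omega)]
  rw [Bool.eq_iff_iff]
  simp only [Bool.not_eq_eq_eq_not, Bool.not_true, Bool.or_eq_true, Bool.and_eq_true,
    List.all_eq_true, PySem.List.mem_enumerate_iff, h0, hlast]
  simp only [List.contains_iff_mem, decide_eq_true_eq, beq_iff_eq, pv_valid_char_iff']
  simp only [ite_eq_iff, List.all_eq_true, decide_eq_true_eq,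
    Bool.false_eq_true, and_false, false_or, Bool.not_eq_false]
  simp
  constructor
  · rintro ⟨hall, h0s, hls⟩ a b k hk rfl rfl
    rcases hall l[k] (List.getElem_mem hk) with h | h | h
    · exact Or.inl (Or.inl h)
    · exact Or.inl (Or.inr h)
    · refine Or.inr ⟨?_, ⟨?_, ?_⟩, ?_⟩
      · rcases h with h | h | h <;> rw [h] <;> exact ⟨by decide, by decide⟩
      · intro ha
        have hk0 : k = 0 := by omega
        subst hk0
        rcases h with h | h | h <;> simp [h] at h0s
      · intro ha
        have hkl : k = l.length - 1 := by omega
        subst hkl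
        rcases h with h | h | h <;> simp [h] at hls
      · rcases h with h | h | h <;> simp [h]
  · intro hB
    refine ⟨?_, ?_, ?_⟩
    · intro c hc
      obtain ⟨k, hk, rfl⟩ := List.mem_iff_getElem.mp hc
      rcases hB (k : Int) l[k] k hk rfl rfl with h | ⟨-, -, h3⟩
      · tauto
      · by_cases hb1 : l[k] = '-'
        · tauto
        · by_cases hb2 : l[k] = '_'
          · tauto
          · exact Or.inr (Or.inr (Or.inr (Or.inr (h3 hb1 hb2))))
    · rcases hB 0 l[0] 0 (by omega) (by norm_num) rfl with h | ⟨-, ⟨ha0, -⟩, -⟩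
      · refine ⟨fun hb => ?_, fun hb => ?_, fun hb => ?_⟩ <;>
          (rw [hb] at h; exact absurd h (by decide))
      · exact absurd rfl ha0
    · have hk : l.length - 1 < l.length := by omega
      rcases hB ((l.length : Int) - 1) l[l.length - 1] (l.length - 1) hk (by omega) rfl
        with h | ⟨-, ⟨-, hal⟩, -⟩
      · refine ⟨fun hb => ?_, fun hb => ?_, fun hb => ?_⟩ <;>
          (rw [hb] at h; exact absurd h (by decide))
      · exact absurd rfl hal

-- ===== VERDICT (by name: the statement is the Claim_ definition above) =====
theorem validate_near_address_spec : Claim_equal_validate_near_address := by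
  intro address _
  unfold Spec_validate_near_address validate_near_address validate_near_address_alt
  by_cases h2 : address.toList.length < 2
  · rw [if_pos h2, if_pos (by omega)]
  · have h2' : 2 ≤ address.toList.length := by omega
    rw [if_neg h2, if_neg (show ¬((address.toList.length : Int) < 2) by omega)]
    exact pv_main address.toList h2'
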